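-- pv_equiv track=rewrite | github.com/vanesakabaya/python-code-challenges | Coding_Challenges/problem_eighteen.py | numberProc
-- ===== SOURCE A (Python) =====
-- def numberProc (numbers):
--
--     # Create an empty array to store  non-duplicated values
--     EmptyArray = []
--
--     # Create an empty dictionary
--     Dict_numbers = {}
--
--     # Check for items in passed array
--     for number in numbers:
--
--         # Prevent duplication
--         if number not in EmptyArray:
--             EmptyArray.append(number)
--
--     # Update the dictionary
--     for item in EmptyArray:
--         Dict_numbers.update({item: (item * 2)})
--
--     return Dict_numbers
-- ===== SOURCE B (Python) =====
-- def numberProc(numbers):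
--     # Head-and-filter dedupe: repeatedly take the first remaining number,
--     # record its double, and filter every occurrence of it out of the worklist.
--     # No membership test is ever needed: the worklist shrinks instead.
--     result = {}
--     rest = list(numbers)
--     while rest:
--         head = rest[0]
--         result[head] = head * 2
--         rest = [x for x in rest if x != head]
--     return result
-- ===== Notes on version B (the rewrite author's own statement) =====
-- stated objective: alternative
-- what changed: Replaces A's membership-guarded dedup list plus second dict-building loop by a head-and-filter worklist: repeatedly take the first remaining number, insert its double, and filter all its occurrences out of the shrinking worklist, so no membership test exists at all.
import Mathlib
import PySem

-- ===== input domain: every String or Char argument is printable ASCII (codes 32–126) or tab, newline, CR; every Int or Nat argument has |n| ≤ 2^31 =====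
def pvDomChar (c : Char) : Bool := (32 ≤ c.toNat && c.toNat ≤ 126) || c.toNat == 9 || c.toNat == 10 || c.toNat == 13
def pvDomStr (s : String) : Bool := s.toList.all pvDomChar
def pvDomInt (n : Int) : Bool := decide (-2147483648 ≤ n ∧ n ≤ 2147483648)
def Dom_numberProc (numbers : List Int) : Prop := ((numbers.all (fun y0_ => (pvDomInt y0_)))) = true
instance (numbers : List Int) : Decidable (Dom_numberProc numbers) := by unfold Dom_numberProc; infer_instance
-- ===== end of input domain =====

-- one honest line: B replaces A's guarded dedup list + second dict loop by a head-and-filter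
-- worklist with no membership test (objective: alternative decomposition).

-- ===== PORT A =====
def numberProc (numbers : List Int) : List (Int × Int) :=
  let emptyArray : List Int :=
    numbers.foldl (fun acc number => if number ∈ acc then acc else acc ++ [number]) []
  let dictNumbers : PySem.Dict Int Int :=
    emptyArray.foldl (fun d item => d.insert item (item * 2)) PySem.Dict.empty
  dictNumbers.items

-- ===== PORT B =====
-- the 'while rest:' loop of Source B: take rest[0], insert its double, filter it out of rest.
-- fuel is a totality guard only: each iteration strictly shrinks rest, so fuel = |numbers| suffices.
def numberProcLoop (fuel : Nat) (rest : List Int) (result : PySem.Dict Int Int) : PySem.Dict Int Int :=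
  match fuel, rest with
  | _, [] => result
  | 0, _ => result
  | fuel + 1, head :: t =>
    numberProcLoop fuel ((head :: t).filter (fun x => x ≠ head)) (result.insert head (head * 2))

def numberProc_alt (numbers : List Int) : List (Int × Int) :=
  (numberProcLoop numbers.length numbers PySem.Dict.empty).items

-- ===== PRECONDITION & SPEC =====
def Spec_numberProc (numbers : List Int) (out : List (Int × Int)) : Prop := out = numberProc_alt numbers
instance (numbers : List Int) (out : List (Int × Int)) : Decidable (Spec_numberProc numbers out) := by unfold Spec_numberProc; infer_instance

-- ===== CLAIM (what is proved, stated in full; the proofs are below) =====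
def Claim_equal_numberProc : Prop := ∀ (numbers : List Int), Dom_numberProc numbers → Spec_numberProc numbers (numberProc numbers)

-- ===== LEMMAS AND PROOFS =====

-- reference head-and-filter dedupe (fuelled), the common description of both programs' key order
def recDedup (fuel : Nat) (l : List Int) : List Int :=
  match fuel, l with
  | _, [] => []
  | 0, _ => []
  | fuel + 1, x :: t => x :: recDedup fuel (t.filter (fun y => y ≠ x))

theorem mem_recDedup {k : Int} : ∀ (fuel : Nat) (l : List Int), k ∈ recDedup fuel l → k ∈ l := by
  intro fuel
  induction fuel with
  | zero => intro l h; cases l <;> simp [recDedup] at h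
  | succ f ih =>
    intro l h
    cases l with
    | nil => simp [recDedup] at h
    | cons x t =>
      rw [recDedup] at h
      rcases List.mem_cons.1 h with h | h
      · simp [h]
      · exact List.mem_cons_of_mem _ (List.mem_of_mem_filter (ih _ h))

theorem nodup_recDedup : ∀ (fuel : Nat) (l : List Int), (recDedup fuel l).Nodup := by
  intro fuel
  induction fuel with
  | zero => intro l; cases l <;> simp [recDedup]
  | succ f ih =>
    intro l
    cases l with
    | nil => simp [recDedup]
    | cons x t =>
      rw [recDedup]
      refine List.nodup_cons.2 ⟨fun hx => ?_, ih _⟩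
      have := List.of_mem_filter (mem_recDedup f _ hx)
      simp at this

-- A's first loop computes recDedup (generalised over the accumulator)
theorem foldl_dedup_eq (l : List Int) : ∀ (seen : List Int) (fuel : Nat), l.length ≤ fuel →
    l.foldl (fun acc number => if number ∈ acc then acc else acc ++ [number]) seen
      = seen ++ recDedup fuel (l.filter (fun y => y ∉ seen)) := by
  induction l with
  | nil => intro seen fuel _; cases fuel <;> simp [recDedup]
  | cons x t ih =>
    intro seen fuel hfuel
    obtain ⟨f, rfl⟩ : ∃ f, fuel = f + 1 := by
      cases fuel
      · simp at hfuel
      · exact ⟨_, rfl⟩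
    have hlen_t : t.length ≤ f := by
      simp only [List.length_cons] at hfuel; omega
    by_cases hx : x ∈ seen
    · have hdrop : (x :: t).filter (fun y => y ∉ seen) = t.filter (fun y => y ∉ seen) := by
        simp [hx]
      simp only [List.foldl_cons, hx, if_true]
      rw [ih seen (f + 1) (hlen_t.trans (Nat.le_succ _)), hdrop]
    · have hdrop : (x :: t).filter (fun y => y ∉ seen) = x :: t.filter (fun y => y ∉ seen) := by
        simp [hx]
      simp only [List.foldl_cons, hx, if_false]
      rw [ih (seen ++ [x]) f hlen_t, hdrop]
      have hfilter : t.filter (fun y => y ∉ seen ++ [x])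
          = (t.filter (fun y => y ∉ seen)).filter (fun y => y ≠ x) := by
        rw [List.filter_filter]
        apply List.filter_congr
        intro y _
        by_cases h1 : y ∈ seen <;> by_cases h2 : y = x <;> simp [h1, h2]
      rw [hfilter]
      have hunf : recDedup (f + 1) (x :: t.filter (fun y => y ∉ seen))
          = x :: recDedup f ((t.filter (fun y => y ∉ seen)).filter (fun y => y ≠ x)) := by
        rw [recDedup]
      simp only [List.append_assoc, List.singleton_append]
      rw [hunf]

-- A's second loop over a Nodup key list appends fresh items
theorem toDict_items (s : List Int) (hnd : s.Nodup) :
    (s.foldl (fun d item => d.insert item (item * 2)) PySem.Dict.empty).items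
      = s.map (fun k => (k, k * 2)) := by
  have h := PySem.Dict.items_foldl_insert_fresh (l := s) (k := fun a => a)
    (v := fun a => a * 2) (d := (PySem.Dict.empty : PySem.Dict Int Int))
    (by intro a _; simp) (by simpa using hnd)
  simpa using h

-- B's loop appends the recDedup keys' doubled pairs to any dict whose keys are fresh
theorem numberProcLoop_items : ∀ (fuel : Nat) (rest : List Int) (d : PySem.Dict Int Int),
    rest.length ≤ fuel → d.keys.Nodup → (∀ k ∈ rest, d.contains k = false) →
    (numberProcLoop fuel rest d).items = d.items ++ (recDedup fuel rest).map (fun k => (k, k * 2)) := by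
  intro fuel
  induction fuel with
  | zero =>
    intro rest d hlen _ _
    have hnil : rest = [] := List.eq_nil_of_length_eq_zero (Nat.le_zero.1 hlen)
    subst hnil
    simp [numberProcLoop, recDedup]
  | succ f ih =>
    intro rest d hlen hnd hfresh
    cases rest with
    | nil => simp [numberProcLoop, recDedup]
    | cons x t =>
      rw [numberProcLoop]
      have hx : d.contains x = false := hfresh x (by simp)
      have hstep : (x :: t).filter (fun y => y ≠ x) = t.filter (fun y => y ≠ x) := by
        simp
      rw [hstep]
      rw [ih (t.filter (fun y => y ≠ x)) (d.insert x (x * 2))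
        (le_trans (List.length_filter_le _ _) (Nat.le_of_succ_le_succ hlen))
        (PySem.Dict.nodup_keys_insert d x (x * 2) hnd)
        (by
          intro k hk
          have hkx : k ≠ x := by
            have := List.of_mem_filter hk
            simpa using this
          have hkt : k ∈ t := List.mem_of_mem_filter hk
          rw [PySem.Dict.contains_insert]
          simp [hkx, hfresh k (List.mem_cons_of_mem _ hkt)])]
      rw [PySem.Dict.items_insert_of_not_contains d (x * 2) hx]
      rw [recDedup]
      simp

-- ===== VERDICT (by name: the statement is the Claim_ definition above) =====
theorem numberProc_spec : Claim_equal_numberProc := by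
  intro numbers _
  unfold Spec_numberProc numberProc numberProc_alt
  rw [foldl_dedup_eq numbers [] numbers.length (le_refl _)]
  simp only [List.nil_append]
  have hfilt : numbers.filter (fun y => y ∉ ([] : List Int)) = numbers := by simp
  rw [hfilt]
  rw [toDict_items _ (nodup_recDedup _ numbers)]
  rw [numberProcLoop_items numbers.length numbers PySem.Dict.empty (le_refl _) (by simp)
    (by intro k _; simp)]
  simp [PySem.Dict.empty]
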